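-- pv_equiv track=rewrite | github.com/TaeTenshi/labs | lab5.py | F_iter
-- ===== SOURCE A (Python) =====
-- from math import factorial
--
-- def F_rec(n):
--     if n == 1:
--         return 1
--     elif n % 2 == 0 and n > 1:
--         return F_rec(n - 1)*(n + 1)
--     elif n % 2 != 0 and n > 1:
--         return factorial(n)
--
-- def F_iter(n):
--     if n == 1: # F(1) = 1
--         return 1
--     elif n % 2 == 0 and n > 1: # F(n) = F(n – 1) * (n + 1)
--         for i in range(2, n + 1, 2):
--             a = 1
--             a *= F_rec(n - 1)*(n + 1)
--         return a
--     elif n % 2 != 0 and n > 1: # F(n)=n!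
--         a = 1
--         while n > 1:
--             a *= n
--             n -= 1
--         return a
-- ===== SOURCE B (Python) =====
-- def F_iter(n):
--     if n < 1:
--         return None
--     a = 1
--     k = 1
--     while k < n:
--         a *= k
--         k += 1
--     return a * (n + 1) if n % 2 == 0 else a * n
-- ===== Notes on version B (the rewrite author's own statement) =====
-- stated objective: simpler
-- what changed: Replaces A's three-branch structure (a purposeless for-loop re-setting the accumulator around a recursive helper that calls math.factorial for even n, and a separate while-loop factorial for odd n) by one accumulating product over the integers below n followed by a parity-dependent final factor (n+1 for even n, n for odd n).
-- outside the precondition, e.g. on F_iter(0): A returns None, B returns None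
import Mathlib
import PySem

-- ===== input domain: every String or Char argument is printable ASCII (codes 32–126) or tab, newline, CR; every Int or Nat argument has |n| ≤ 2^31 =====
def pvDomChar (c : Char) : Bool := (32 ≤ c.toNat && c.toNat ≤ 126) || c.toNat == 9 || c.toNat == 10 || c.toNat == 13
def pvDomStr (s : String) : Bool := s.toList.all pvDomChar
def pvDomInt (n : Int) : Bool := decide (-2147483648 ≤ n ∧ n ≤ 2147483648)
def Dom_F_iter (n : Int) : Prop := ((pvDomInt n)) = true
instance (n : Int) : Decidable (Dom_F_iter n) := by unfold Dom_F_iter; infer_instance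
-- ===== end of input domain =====

-- B unifies A's branches into one product loop with a parity-dependent final factor.

-- ===== PORT A =====
-- math.factorial(n) (called by F_rec only with n ≥ 1)
def pyFactorial (n : Int) : Int := ((Nat.factorial n.toNat : Nat) : Int)

-- F_rec from Source A; the final `else 0` stands for Python's implicit `return None`,
-- reached only outside Pre_ (n < 1), where nothing is claimed.
def F_rec (n : Int) : Int :=
  if n = 1 then 1
  else if n % 2 = 0 ∧ n > 1 then F_rec (n - 1) * (n + 1)
  else if n % 2 ≠ 0 ∧ n > 1 then pyFactorial n
  else 0
termination_by n.toNat
decreasing_by omega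

-- the odd-branch while loop: while n > 1: a *= n; n -= 1
def whileProd (a n : Int) : Int :=
  if n > 1 then whileProd (a * n) (n - 1) else a
termination_by n.toNat
decreasing_by omega

def F_iter (n : Int) : Int :=
  if n = 1 then 1
  else if n % 2 = 0 ∧ n > 1 then
    -- for i in range(2, n+1, 2): a = 1; a *= F_rec(n-1)*(n+1)
    -- (init 0 marks `a` undefined before the loop; the loop is nonempty for even n > 1)
    (PySem.List.pyRange 2 (n + 1) 2).foldl (fun _ _ => 1 * (F_rec (n - 1) * (n + 1))) 0
  else if n % 2 ≠ 0 ∧ n > 1 then whileProd 1 n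
  else 0  -- Python returns None here (n < 1): outside Pre_

-- ===== PORT B =====
-- the B while loop: while k < n: a *= k; k += 1
def prodBelow (a k n : Int) : Int :=
  if k < n then prodBelow (a * k) (k + 1) n else a
termination_by (n - k).toNat
decreasing_by omega

def F_iter_alt (n : Int) : Int :=
  -- Source B's `if n < 1: return None` guard lies outside Pre_ (None is not an Int); omitted here
  let a := prodBelow 1 1 n
  if n % 2 = 0 then a * (n + 1) else a * n

-- ===== PRECONDITION & SPEC =====
-- Pre_ excludes n < 1, where Python A (and B) return None, not an int.
def Pre_F_iter (n : Int) : Prop := 1 ≤ n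
instance (n : Int) : Decidable (Pre_F_iter n) := by unfold Pre_F_iter; infer_instance
def pvWitness_F_iter : Int := 6

def Spec_F_iter (n : Int) (out : Int) : Prop := out = F_iter_alt n
instance (n : Int) (out : Int) : Decidable (Spec_F_iter n out) := by unfold Spec_F_iter; infer_instance

-- ===== CLAIM (what is proved, stated in full; the proofs are below) =====
def Claim_equal_F_iter : Prop := ∀ (n : Int), Dom_F_iter n → Pre_F_iter n → Spec_F_iter n (F_iter n)

-- ===== LEMMAS AND PROOFS =====

-- A's while loop computes a * n! for n ≥ 1
theorem whileProd_eq (a n : Int) (h : 1 ≤ n) :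
    whileProd a n = a * ((Nat.factorial n.toNat : Nat) : Int) := by
  suffices H : ∀ (m : Nat) (a n : Int), n.toNat = m → 1 ≤ n →
      whileProd a n = a * ((Nat.factorial n.toNat : Nat) : Int) from H n.toNat a n rfl h
  intro m
  induction m with
  | zero => intro a n hm hn; omega
  | succ m ih =>
    intro a n hm hn
    rw [whileProd]
    by_cases h1 : n > 1
    · rw [if_pos h1, ih (a * n) (n - 1) (by omega) (by omega)]
      have hfac : n.toNat = ((n - 1).toNat) + 1 := by omega
      rw [hfac, Nat.factorial_succ]
      push_cast
      have hc : ((n - 1).toNat : Int) + 1 = n := by omega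
      rw [hc]; ring
    · have hn1 : n = 1 := by omega
      simp [hn1]

-- B's loop computes a * (product of k..n-1) relative to factorials: key invariant
theorem prodBelow_fact (a k n : Int) (hk : 1 ≤ k) (hkn : k ≤ n) :
    prodBelow a k n * ((Nat.factorial (k - 1).toNat : Nat) : Int) =
      a * ((Nat.factorial (n - 1).toNat : Nat) : Int) := by
  suffices H : ∀ (m : Nat) (a k : Int), (n - k).toNat = m → 1 ≤ k → k ≤ n →
      prodBelow a k n * ((Nat.factorial (k - 1).toNat : Nat) : Int) =
        a * ((Nat.factorial (n - 1).toNat : Nat) : Int) from H (n - k).toNat a k rfl hk hkn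
  intro m
  induction m with
  | zero =>
    intro a k hm hk1 hkn1
    have hkn' : k = n := by omega
    rw [prodBelow, if_neg (by omega), hkn']
  | succ m ih =>
    intro a k hm hk1 hkn1
    rw [prodBelow, if_pos (by omega : k < n)]
    have h2 := ih (a * k) (k + 1) (by omega) (by omega) (by omega)
    have hk1' : (k + 1 - 1).toNat = ((k - 1).toNat) + 1 := by omega
    rw [hk1', Nat.factorial_succ] at h2
    push_cast at h2
    have hc : ((k - 1).toNat : Int) + 1 = k := by omega
    rw [hc] at h2
    have hkne : (k : Int) ≠ 0 := by omega
    apply mul_left_cancel₀ hkne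
    linear_combination h2

-- hence prodBelow 1 1 n = (n-1)! for n ≥ 1
theorem prodBelow_eq (n : Int) (h : 1 ≤ n) :
    prodBelow 1 1 n = ((Nat.factorial (n - 1).toNat : Nat) : Int) := by
  have := prodBelow_fact 1 1 n le_rfl h
  simpa [Nat.factorial] using this

-- F_rec on an odd argument m ≥ 1 is m!
theorem F_rec_odd (m : Int) (h1 : 1 ≤ m) (hodd : m % 2 ≠ 0) :
    F_rec m = ((Nat.factorial m.toNat : Nat) : Int) := by
  rw [F_rec]
  by_cases hm1 : m = 1
  · simp [hm1]
  · rw [if_neg hm1, if_neg (by omega), if_pos ⟨hodd, by omega⟩]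
    rfl

-- a constant-valued fold over a nonempty list returns the constant
theorem foldl_const_ne_nil {α β : Type} (c : β) (i : β) (l : List α) (h : l ≠ []) :
    l.foldl (fun _ _ => c) i = c := by
  induction l generalizing i with
  | nil => exact absurd rfl h
  | cons x xs ih =>
    cases xs with
    | nil => rfl
    | cons y ys => exact ih ((fun _ _ => c) i x) (by simp)

-- ===== VERDICT (by name: the statement is the Claim_ definition above) =====
theorem F_iter_spec : Claim_equal_F_iter := by
  intro n _ hpre
  unfold Spec_F_iter F_iter F_iter_alt
  have hn1 : (1 : Int) ≤ n := hpre
  by_cases h1 : n = 1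
  · subst h1; rw [if_pos rfl, prodBelow]; norm_num
  · rw [if_neg h1]
    by_cases he : n % 2 = 0
    · -- even n > 1: both sides are (n-1)! * (n+1)
      have hn2 : 2 ≤ n := by
        rcases lt_or_ge n 2 with h | h
        · exfalso; interval_cases n; simp_all
        · exact h
      rw [if_pos ⟨he, by omega⟩]
      have hne : PySem.List.pyRange 2 (n + 1) 2 ≠ [] := by
        intro hc
        have : (2 : Int) ∈ PySem.List.pyRange 2 (n + 1) 2 := by
          rw [PySem.List.mem_pyRange_iff_of_pos (by omega)]
          exact ⟨by omega, by omega, ⟨0, by ring⟩⟩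
        rw [hc] at this; exact absurd this (List.not_mem_nil)
      rw [foldl_const_ne_nil _ _ _ hne]
      have hodd : (n - 1) % 2 ≠ 0 := by omega
      rw [F_rec_odd (n - 1) (by omega) hodd, prodBelow_eq n hn1, if_pos he]
      ring
    · -- odd n > 1: both sides are n!
      rw [if_neg (by exact fun h => he h.1), if_pos ⟨he, by omega⟩,
        whileProd_eq 1 n hn1, prodBelow_eq n hn1, if_neg he]
      have hfac : n.toNat = ((n - 1).toNat) + 1 := by omega
      rw [hfac, Nat.factorial_succ]
      push_cast
      have : ((n - 1).toNat : Int) + 1 = n := by omega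
      rw [this]; ring
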